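-- pv_equiv track=rewrite | github.com/webersab/relationExtractionPipeline | de_pipeline/nel.py | add_entity_tags
-- ===== SOURCE A (Python) =====
-- def add_entity_tags(tagged):
--     """
--     Format the tagged sentences - add <entity></entity> tags
--     """
--     formatted_sent = ''
--     prev_tag = '0'
--     entpresent = False
--     for t in range(0,len(tagged)):
--         if tagged[t][1] != prev_tag:
--             if entpresent:
--                 if tagged[t][1] != '0':
--                     formatted_sent += '</entity> <entity>' + tagged[t][0] + ' '
--                     entpresent = True
--                 else:
--                     formatted_sent += '</entity> ' +tagged[t][0] + ' '
--                     entpresent = False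
--             else:
--                 formatted_sent += '<entity>' + tagged[t][0] + ' '
--                 entpresent = True
--         elif tagged[t][1] == prev_tag or tagged[t][1] == '0':
--             formatted_sent += tagged[t][0] + ' '
--         prev_tag = tagged[t][1]
--     if entpresent: # Final token is the entity
--         formatted_sent += '</entity>'
--     formatted_sent = formatted_sent.replace(' </e', '</e').rstrip()
--     return formatted_sent
-- ===== SOURCE B (Python) =====
-- from itertools import groupby
--
--
-- def add_entity_tags(tagged):
--     """
--     Format the tagged sentences - add <entity></entity> tags.
--     Grouping-then-mapping reformulation: split the tokens into maximal runs
--     of equal tag, render each run as one segment, join the segments, and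
--     apply the same finishing steps as the original (the space before
--     '</entity>' is collapsed by the same global replace).
--     """
--     segments = []
--     for tag, grp in groupby(tagged, key=lambda t: t[1]):
--         toks = ' '.join(tok for tok, _ in grp)
--         if tag != '0':
--             segments.append('<entity>' + toks + ' </entity>')
--         else:
--             segments.append(toks)
--     return ' '.join(segments).replace(' </e', '</e').rstrip()
-- ===== Notes on version B (the rewrite author's own statement) =====
-- stated objective: simpler
-- what changed: Replaced the prev_tag/entpresent state machine over indices by grouping the tokens into maximal runs of equal tag and rendering each run as one segment, joined with spaces, with the same global replace/rstrip finish.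
import Mathlib
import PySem

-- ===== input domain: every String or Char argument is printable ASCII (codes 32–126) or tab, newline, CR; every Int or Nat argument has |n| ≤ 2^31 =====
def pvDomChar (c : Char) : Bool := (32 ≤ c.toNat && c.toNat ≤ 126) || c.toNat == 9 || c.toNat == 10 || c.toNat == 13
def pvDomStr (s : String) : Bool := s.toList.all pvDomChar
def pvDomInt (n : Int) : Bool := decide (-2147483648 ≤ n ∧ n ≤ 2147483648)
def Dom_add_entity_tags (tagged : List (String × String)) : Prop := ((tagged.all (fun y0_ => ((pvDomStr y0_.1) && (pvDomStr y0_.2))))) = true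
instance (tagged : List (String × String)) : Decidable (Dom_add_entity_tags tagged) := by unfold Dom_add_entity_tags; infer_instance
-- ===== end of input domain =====

-- B replaces A's prev_tag/entpresent state machine by grouping the tokens into maximal
-- runs of equal tag and rendering each run as one segment (objective: simpler decomposition).

-- ===== PORT A =====
-- the loop body of A: state (formatted_sent as code points, prev_tag, entpresent)
def aStep (st : List Char × String × Bool) (t : String × String) : List Char × String × Bool :=
  if t.2 ≠ st.2.1 then
    if st.2.2 then
      if t.2 ≠ "0" then (st.1 ++ "</entity> <entity>".toList ++ t.1.toList ++ [' '], t.2, true)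
      else (st.1 ++ "</entity> ".toList ++ t.1.toList ++ [' '], t.2, false)
    else (st.1 ++ "<entity>".toList ++ t.1.toList ++ [' '], t.2, true)
  else if t.2 = st.2.1 ∨ t.2 = "0" then (st.1 ++ t.1.toList ++ [' '], t.2, st.2.2)
  else (st.1, t.2, st.2.2)

-- 'if entpresent: formatted_sent += "</entity>"' after the loop
def aFinish (st : List Char × String × Bool) : List Char :=
  if st.2.2 then st.1 ++ "</entity>".toList else st.1

def add_entity_tags (tagged : List (String × String)) : String :=
  PySem.Str.rstrip (PySem.Str.replace
    (String.ofList (aFinish (tagged.foldl aStep ([], "0", false)))) " </e" "</e")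

-- ===== PORT B =====
-- itertools.groupby(tagged, key=λt. t[1]) as a recursive run-grouping
def bRuns : List (String × String) → List (String × List String)
  | [] => []
  | (w, t) :: rest =>
    match bRuns rest with
    | (t', ws) :: rs => if t' = t then (t, w :: ws) :: rs else (t, [w]) :: (t', ws) :: rs
    | [] => [(t, [w])]

def bSeg (p : String × List String) : List Char :=
  if p.1 ≠ "0" then "<entity>".toList ++ PySem.Chars.join [' '] (p.2.map String.toList) ++ " </entity>".toList
  else PySem.Chars.join [' '] (p.2.map String.toList)

def add_entity_tags_alt (tagged : List (String × String)) : String :=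
  PySem.Str.rstrip (PySem.Str.replace
    (String.ofList (PySem.Chars.join [' '] ((bRuns tagged).map bSeg))) " </e" "</e")

-- ===== PRECONDITION & SPEC =====
def Spec_add_entity_tags (tagged : List (String × String)) (out : String) : Prop := out = add_entity_tags_alt tagged
instance (tagged : List (String × String)) (out : String) : Decidable (Spec_add_entity_tags tagged out) := by unfold Spec_add_entity_tags; infer_instance

-- ===== CLAIM (what is proved, stated in full; the proofs are below) =====
def Claim_equal_add_entity_tags : Prop := ∀ (tagged : List (String × String)), Dom_add_entity_tags tagged → Spec_add_entity_tags tagged (add_entity_tags tagged)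

-- ===== LEMMAS AND PROOFS =====

-- what the first token of a run makes A emit, given the previous run's tag
def opener (prev tg : String) : List Char :=
  if tg = prev then [] else
  if prev = "0" then "<entity>".toList
  else if tg = "0" then "</entity> ".toList
  else "</entity> <entity>".toList

-- A's emitted text from a point where the previous tag is `prev` (entpresent = (prev ≠ "0"))
def rawA : List (String × String) → String → List Char
  | [], prev => if prev ≠ "0" then "</entity>".toList else []
  | (w, tg) :: rest, prev => opener prev tg ++ w.toList ++ [' '] ++ rawA rest tg

-- each token followed by one space
def toksSp (ws : List String) : List Char := (ws.map (fun w => w.toList ++ [' '])).flatten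

-- A's text from a run list, same contextual shape as rawA
def flatR : String → List (String × List String) → List Char
  | prev, [] => if prev ≠ "0" then "</entity>".toList else []
  | prev, (t, ws) :: rs => opener prev t ++ toksSp ws ++ flatR t rs

def leadF (prev : String) (rs : List (String × List String)) : List Char :=
  if prev = "0" then [] else "</entity>".toList ++ (if rs.isEmpty then [] else [' '])

def trailF (rs : List (String × List String)) : List Char :=
  match rs.getLast? with
  | none => []
  | some p => if p.1 = "0" then [' '] else []

-- adjacent runs carry different tags
def runsOk : List (String × List String) → Prop
  | [] => True
  | [_] => True
  | a :: b :: rs => b.1 ≠ a.1 ∧ runsOk (b :: rs)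

lemma foldA (l : List (String × String)) : ∀ (fs : List Char) (prev : String),
    aFinish (l.foldl aStep (fs, prev, !(prev == "0"))) = fs ++ rawA l prev := by
  induction l with
  | nil =>
    intro fs prev
    by_cases h : prev = "0" <;> simp [rawA, aFinish, h]
  | cons p rest ih =>
    intro fs prev
    obtain ⟨w, tg⟩ := p
    simp only [List.foldl_cons]
    by_cases hpe : tg = prev
    · have h1 : aStep (fs, prev, !(prev == "0")) (w, tg) = (fs ++ w.toList ++ [' '], tg, !(tg == "0")) := by
        simp [aStep, hpe]
      rw [h1, ih]
      simp [rawA, opener, hpe]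
    · by_cases hp0 : prev = "0"
      · have htg0 : tg ≠ "0" := by rw [hp0] at hpe; exact hpe
        have h1 : aStep (fs, prev, !(prev == "0")) (w, tg)
            = (fs ++ "<entity>".toList ++ w.toList ++ [' '], tg, !(tg == "0")) := by
          simp [aStep, hp0, htg0]
        rw [h1, ih]
        simp [rawA, opener, hp0, htg0]
      · by_cases htg0 : tg = "0"
        · have hne : ("0" : String) ≠ prev := by rw [← htg0]; exact hpe
          have h1 : aStep (fs, prev, !(prev == "0")) (w, tg)
              = (fs ++ "</entity> ".toList ++ w.toList ++ [' '], tg, !(tg == "0")) := by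
            simp [aStep, hp0, htg0, hne]
          rw [h1, ih]
          simp [rawA, opener, hp0, htg0, hne]
        · have h1 : aStep (fs, prev, !(prev == "0")) (w, tg)
              = (fs ++ "</entity> <entity>".toList ++ w.toList ++ [' '], tg, !(tg == "0")) := by
            simp [aStep, hpe, hp0, htg0]
          rw [h1, ih]
          simp [rawA, opener, hpe, hp0, htg0]

lemma rawA_runs (l : List (String × String)) : ∀ prev, rawA l prev = flatR prev (bRuns l) := by
  induction l with
  | nil => intro prev; simp [rawA, bRuns, flatR]
  | cons p rest ih =>
    intro prev
    obtain ⟨w, tg⟩ := p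
    show opener prev tg ++ w.toList ++ [' '] ++ rawA rest tg = flatR prev (bRuns ((w, tg) :: rest))
    rw [ih]
    simp only [bRuns]
    cases hr : bRuns rest with
    | nil => simp [flatR, toksSp]
    | cons q rs =>
      obtain ⟨t', ws⟩ := q
      by_cases ht : t' = tg
      · subst ht
        simp [flatR, toksSp, opener]
      · simp [ht, flatR, toksSp, opener]

lemma bRuns_ne (l : List (String × String)) : ∀ p ∈ bRuns l, p.2 ≠ [] := by
  induction l with
  | nil => simp [bRuns]
  | cons p rest ih =>
    obtain ⟨w, tg⟩ := p
    simp only [bRuns]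
    cases hr : bRuns rest with
    | nil => simp
    | cons q rs =>
      rw [hr] at ih
      obtain ⟨t', ws⟩ := q
      dsimp only
      by_cases ht : t' = tg
      · rw [if_pos ht]
        intro x hx
        rcases List.mem_cons.mp hx with h | h
        · subst h; simp
        · exact ih x (List.mem_cons.mpr (Or.inr h))
      · rw [if_neg ht]
        intro x hx
        rcases List.mem_cons.mp hx with h | h
        · subst h; simp
        · exact ih x h

lemma bRuns_ok (l : List (String × String)) : runsOk (bRuns l) := by
  induction l with
  | nil => simp [bRuns, runsOk]
  | cons p rest ih =>
    obtain ⟨w, tg⟩ := p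
    simp only [bRuns]
    cases hr : bRuns rest with
    | nil => simp [runsOk]
    | cons q rs =>
      rw [hr] at ih
      obtain ⟨t', ws⟩ := q
      dsimp only
      by_cases ht : t' = tg
      · rw [if_pos ht]
        subst ht
        cases rs with
        | nil => simp [runsOk]
        | cons r rs' => exact ⟨ih.1, ih.2⟩
      · rw [if_neg ht]
        exact ⟨fun h => ht h, ih⟩

lemma inter_cons (a b : List Char) (l : List (List Char)) :
    [' '].intercalate (a :: b :: l) = a ++ [' '] ++ [' '].intercalate (b :: l) := by
  simp [List.intercalate]

lemma toksSp_eq (ws : List String) (h : ws ≠ []) :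
    toksSp ws = PySem.Chars.join [' '] (ws.map String.toList) ++ [' '] := by
  induction ws with
  | nil => exact absurd rfl h
  | cons w ws' ih =>
    cases ws' with
    | nil => simp [toksSp, PySem.Chars.join, List.intercalate]
    | cons v vs =>
      simp only [toksSp, List.map_cons, List.flatten_cons] at ih ⊢
      rw [ih (by simp)]
      simp [PySem.Chars.join, inter_cons]

lemma flat_join (rs : List (String × List String)) : ∀ prev,
    (∀ p ∈ rs, p.2 ≠ []) →
    runsOk rs →
    (∀ h : rs ≠ [], prev ≠ "0" → (rs.head h).1 ≠ prev) →
    flatR prev rs = leadF prev rs ++ [' '].intercalate (rs.map bSeg) ++ trailF rs := by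
  induction rs with
  | nil =>
    intro prev _ _ _
    by_cases h : prev = "0" <;> simp [flatR, leadF, trailF, h, List.intercalate]
  | cons q rs' ih =>
    intro prev hne hch hhd
    obtain ⟨t, ws⟩ := q
    have hws : ws ≠ [] := hne (t, ws) (by simp)
    have hop : opener prev t = leadF prev ((t, ws) :: rs') ++ (if t = "0" then ([] : List Char) else "<entity>".toList) := by
      by_cases hp0 : prev = "0"
      · subst hp0
        by_cases ht0 : t = "0"
        · simp [opener, leadF, ht0]
        · simp [opener, leadF, ht0]
      · have htp : t ≠ prev := hhd (by simp) hp0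
        by_cases ht0 : t = "0"
        · simp [opener, leadF, hp0, ht0, ht0 ▸ htp]
        · simp [opener, leadF, htp, hp0, ht0]
    have hch' : runsOk rs' := by
      cases rs' with
      | nil => trivial
      | cons r rs'' => exact hch.2
    have hhd' : ∀ h : rs' ≠ [], t ≠ "0" → (rs'.head h).1 ≠ t := by
      intro h _
      cases rs' with
      | nil => exact absurd rfl h
      | cons r rs'' => exact hch.1
    have hrec := ih t (fun p hp => hne p (by simp [hp])) hch' hhd'
    show opener prev t ++ toksSp ws ++ flatR t rs' = _
    rw [hrec, toksSp_eq ws hws, hop]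
    cases rs' with
    | nil =>
      by_cases ht0 : t = "0" <;>
        simp [leadF, trailF, bSeg, ht0, List.intercalate]
    | cons r rs'' =>
      simp only [List.map_cons]
      rw [inter_cons]
      by_cases ht0 : t = "0" <;>
        simp [leadF, trailF, bSeg, ht0, List.getLast?_cons_cons]

-- equation lemmas for PySem.Chars.replace.go
lemma go_zero (old new l acc : List Char) :
    PySem.Chars.replace.go old new 0 l acc = acc.reverse ++ l := by
  rw [PySem.Chars.replace.go]

lemma go_succ_nil (old new acc : List Char) (fuel : Nat) :
    PySem.Chars.replace.go old new (fuel + 1) [] acc = acc.reverse := by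
  rw [PySem.Chars.replace.go]
  omega

lemma go_succ_cons (old new : List Char) (fuel : Nat) (c : Char) (t acc : List Char) :
    PySem.Chars.replace.go old new (fuel + 1) (c :: t) acc =
      (if old.isPrefixOf (c :: t) then
         PySem.Chars.replace.go old new fuel (List.drop old.length (c :: t)) (new.reverse ++ acc)
       else PySem.Chars.replace.go old new fuel t (c :: acc)) := by
  rw [PySem.Chars.replace.go]

-- the replace pattern " </e" cannot match across a space appended at the end
lemma go_append_space : ∀ (n : Nat) (l acc : List Char), l.length ≤ n →
    PySem.Chars.replace.go [' ', '<', '/', 'e'] ['<', '/', 'e'] (n + 1) (l ++ [' ']) acc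
      = PySem.Chars.replace.go [' ', '<', '/', 'e'] ['<', '/', 'e'] n l acc ++ [' '] := by
  intro n
  induction n using Nat.strong_induction_on with
  | _ n ihn =>
    intro l acc hlen
    cases l with
    | nil =>
      rw [show (([] : List Char) ++ [' ']) = ' ' :: [] by simp]
      rw [go_succ_cons]
      rw [show ([' ', '<', '/', 'e'].isPrefixOf [' ']) = false by decide]
      simp only [Bool.false_eq_true, if_false]
      cases n with
      | zero => rw [go_zero, go_zero]; simp
      | succ m => rw [go_succ_nil, go_succ_nil]; simp
    | cons c t =>
      obtain ⟨m, rfl⟩ : ∃ m, n = m + 1 := ⟨n - 1, by simp only [List.length_cons] at hlen; omega⟩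
      rw [show ((c :: t) ++ [' ']) = c :: (t ++ [' ']) by simp]
      rw [go_succ_cons, go_succ_cons]
      cases hpre : ([' ', '<', '/', 'e']).isPrefixOf (c :: t) with
      | true =>
        have hpreP : [' ', '<', '/', 'e'] <+: (c :: t) := List.isPrefixOf_iff_prefix.mp hpre
        have hlen4 : 4 ≤ (c :: t).length := by
          have := hpreP.length_le
          simpa using this
        have hpre' : ([' ', '<', '/', 'e']).isPrefixOf (c :: (t ++ [' '])) = true := by
          rw [show c :: (t ++ [' ']) = (c :: t) ++ [' '] by simp]
          exact List.isPrefixOf_iff_prefix.mpr (hpreP.trans (List.prefix_append _ _))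
        rw [hpre']
        rw [if_pos rfl, if_pos rfl]
        have hdrop : List.drop ([' ', '<', '/', 'e']).length (c :: (t ++ [' ']))
            = List.drop ([' ', '<', '/', 'e']).length (c :: t) ++ [' '] := by
          rw [show c :: (t ++ [' ']) = (c :: t) ++ [' '] by simp]
          rw [List.drop_append_of_le_length (by simpa using hlen4)]
        rw [hdrop]
        have hm : (List.drop ([' ', '<', '/', 'e']).length (c :: t)).length ≤ m := by
          simp only [List.length_drop, List.length_cons, List.length_nil]
          simp only [List.length_cons] at hlen
          omega
        exact ihn m (by omega) _ _ hm
      | false =>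
        have hpreP : ¬ [' ', '<', '/', 'e'] <+: (c :: t) := by
          intro hcon
          rw [List.isPrefixOf_iff_prefix.mpr hcon] at hpre
          cases hpre
        have hpre' : ([' ', '<', '/', 'e']).isPrefixOf (c :: (t ++ [' '])) = false := by
          rcases Bool.eq_false_or_eq_true (([' ', '<', '/', 'e']).isPrefixOf (c :: (t ++ [' ']))) with h | h
          swap
          · exact h
          · exfalso
            have hcon : [' ', '<', '/', 'e'] <+: ((c :: t) ++ [' ']) := by
              rw [show (c :: t) ++ [' '] = c :: (t ++ [' ']) by simp]
              exact List.isPrefixOf_iff_prefix.mp h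
            apply hpreP
            rcases Nat.lt_or_ge (c :: t).length 4 with hlt | hge
            · exfalso
              have hlen' : ([' ', '<', '/', 'e']).length ≤ (c :: t).length + 1 := by
                have := hcon.length_le
                simpa using this
              have h4 : ([' ', '<', '/', 'e']).length = 4 := by decide
              have heq : [' ', '<', '/', 'e'] = (c :: t) ++ [' '] := by
                apply List.IsPrefix.eq_of_length hcon
                rw [h4] at hlen' ⊢
                simp only [List.length_append, List.length_cons] at hlt hlen' ⊢
                simp only [List.length_nil]
                omega
              have hlast := congrArg List.getLast? heq
              rw [List.getLast?_concat] at hlast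
              simp at hlast
            · exact List.prefix_of_prefix_length_le hcon
                (List.prefix_append _ _) (by simpa using hge)
        rw [hpre']
        simp only [Bool.false_eq_true, if_false]
        exact ihn m (by omega) t (c :: acc) (by simp only [List.length_cons] at hlen; omega)

lemma replace_append_space (s : List Char) :
    PySem.Chars.replace (s ++ [' ']) [' ', '<', '/', 'e'] ['<', '/', 'e']
      = PySem.Chars.replace s [' ', '<', '/', 'e'] ['<', '/', 'e'] ++ [' '] := by
  rw [PySem.Chars.replace, PySem.Chars.replace]
  rw [show ([' ', '<', '/', 'e']).isEmpty = false by decide]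
  simp only [Bool.false_eq_true, if_false]
  rw [show (s ++ [' ']).length = s.length + 1 by simp]
  exact go_append_space s.length s [] (le_refl _)

lemma rstrip_append_space (s : List Char) :
    PySem.Chars.rstrip (s ++ [' ']) = PySem.Chars.rstrip s := by
  simp [PySem.Chars.rstrip, show PySem.Chars.isspace ' ' = true from by decide]

lemma trailF_cases (rs : List (String × List String)) : trailF rs = [] ∨ trailF rs = [' '] := by
  rcases hl : rs.getLast? with _ | p
  · left; simp [trailF, hl]
  · by_cases h : p.1 = "0"
    · right; simp [trailF, hl, h]
    · left; simp [trailF, hl, h]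

-- ===== VERDICT (by name: the statement is the Claim_ definition above) =====
theorem add_entity_tags_spec : Claim_equal_add_entity_tags := by
  intro tagged _
  unfold Spec_add_entity_tags
  unfold add_entity_tags add_entity_tags_alt
  have hstart : (([] : List Char), ("0" : String), false)
      = (([] : List Char), ("0" : String), !(("0" : String) == "0")) := by
    simp
  rw [hstart, foldA tagged [] "0", List.nil_append, rawA_runs tagged "0",
    flat_join (bRuns tagged) "0" (bRuns_ne tagged) (bRuns_ok tagged)
      (fun _ h => absurd rfl h)]
  have hlead : leadF "0" (bRuns tagged) = [] := by simp [leadF]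
  rw [hlead, List.nil_append]
  have hofl : ∀ cs : List Char, (String.ofList cs).toList = cs := by
    intro cs
    simp
  rcases trailF_cases (bRuns tagged) with h | h <;> rw [h]
  · simp only [List.append_nil]
    rfl
  · apply String.toList_inj.mp
    simp only [PySem.Str.toList_rstrip, PySem.Str.toList_replace, hofl]
    rw [replace_append_space, rstrip_append_space]
    rfl
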